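-- pv_equiv track=rewrite | github.com/skarabasakis/sub | sub/analyzer/analyze.py | analyze_options
-- ===== SOURCE A (Python) =====
-- def analyze_options(argv, keywords):
--     # argv = ["netflix.com", "for", "14/m", "since", "last", "week", "until", "today"]
--     keyword_indexes = sorted([i for i, arg in enumerate(argv) if arg in keywords])
--     # keyword_indexes = [1,3,6]
--     slice_indexes =  zip([None, *keyword_indexes], [*keyword_indexes, None])
--     # slice_indexes [(None, 1), (1,3), (3,6), (6,None)]
--     slices = [argv[start:end] for start, end in slice_indexes]
--     # keyword_slices = [['netflix.com'], ['for', '14/m'], ['since', 'last', 'week'], ['until', 'today']]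
--     name_slice, *option_slices = slices
--     # name_slice = ['netflix.com']
--     # option_slices = ['for', '14/m'], ['since', 'last', 'week'], ['until', 'today']
--
--     name = None if len(name_slice) == 0 else ' '.join(name_slice)
--     options = {option: ' '.join(values) for option, *values in option_slices}
--
--     return (name, options)
-- ===== SOURCE B (Python) =====
-- def analyze_options(argv, keywords):
--     # single streaming pass: accumulate values for the current group, flush on each keyword and once at the end
--     name = None
--     options = {}
--     current_key = None
--     current_vals = []
--
--     def flush():
--         nonlocal name
--         if current_key is None:
--             name = ' '.join(current_vals) if current_vals else None
--         else:
--             options[current_key] = ' '.join(current_vals)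
--
--     for arg in argv:
--         if arg in keywords:
--             flush()
--             current_key = arg
--             current_vals = []
--         else:
--             current_vals.append(arg)
--     flush()
--     return (name, options)
-- ===== Notes on version B (the rewrite author's own statement) =====
-- stated objective: alternative
-- what changed: Replaced A's index-collecting/zip/slice pipeline with a single streaming pass that accumulates the current group's values and flushes them on each keyword and once after the loop.
import Mathlib
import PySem

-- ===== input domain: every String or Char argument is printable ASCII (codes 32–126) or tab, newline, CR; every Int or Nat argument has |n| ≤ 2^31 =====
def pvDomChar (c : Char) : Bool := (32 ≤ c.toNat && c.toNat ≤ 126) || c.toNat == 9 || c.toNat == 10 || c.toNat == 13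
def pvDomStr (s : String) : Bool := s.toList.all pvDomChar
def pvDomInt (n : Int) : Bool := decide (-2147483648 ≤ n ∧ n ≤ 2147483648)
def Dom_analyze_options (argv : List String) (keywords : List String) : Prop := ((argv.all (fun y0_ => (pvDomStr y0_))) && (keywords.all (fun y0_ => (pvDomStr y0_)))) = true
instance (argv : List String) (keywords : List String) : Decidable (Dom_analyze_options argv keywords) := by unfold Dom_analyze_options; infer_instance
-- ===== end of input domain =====

-- B replaces A's index/zip/slice pipeline by one streaming pass over argv (same return value; no speed claim).

-- ===== PORT A =====
def analyze_options (argv : List String) (keywords : List String) : Option String × (List (String × String)) :=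
  let keyword_indexes : List Int :=
    PySem.List.sorted
      ((PySem.List.enumerate argv).filterMap (fun p => if p.2 ∈ keywords then some p.1 else none))
      (fun i => i)
  let slice_indexes : List (Option Int × Option Int) :=
    List.zip (none :: keyword_indexes.map some) (keyword_indexes.map some ++ [none])
  let slices := slice_indexes.map (fun p => PySem.List.slice argv p.1 p.2)
  match slices with
  | [] => (none, [])  -- unreachable: slices always has at least one element (Python's unpack would raise)
  | name_slice :: option_slices =>
    let name : Option String :=
      if name_slice.length = 0 then none else some (PySem.Str.join " " name_slice)
    let options : PySem.Dict String String :=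
      option_slices.foldl (fun d sl =>
        match sl with
        | [] => d  -- unreachable: every option slice starts with its keyword (Python's unpack would raise)
        | option :: values => d.insert option (PySem.Str.join " " values)) PySem.Dict.empty
    (name, options.items)

-- ===== PORT B =====
-- flush(): write the pending group into name (no key yet) or into the option dict
def pvFlush (name : Option String) (options : PySem.Dict String String)
    (current_key : Option String) (current_vals : List String) :
    Option String × PySem.Dict String String :=
  match current_key with
  | none => (if current_vals = [] then none else some (PySem.Str.join " " current_vals), options)
  | some k => (name, options.insert k (PySem.Str.join " " current_vals))

-- one loop iteration of Source B
def pvStepB (keywords : List String)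
    (st : Option String × PySem.Dict String String × Option String × List String)
    (arg : String) : Option String × PySem.Dict String String × Option String × List String :=
  if arg ∈ keywords then
    let q := pvFlush st.1 st.2.1 st.2.2.1 st.2.2.2
    (q.1, q.2, some arg, [])
  else
    (st.1, st.2.1, st.2.2.1, st.2.2.2 ++ [arg])

def analyze_options_alt (argv : List String) (keywords : List String) : Option String × (List (String × String)) :=
  let st := argv.foldl (pvStepB keywords) (none, PySem.Dict.empty, none, [])
  let p := pvFlush st.1 st.2.1 st.2.2.1 st.2.2.2
  (p.1, p.2.items)

-- ===== PRECONDITION & SPEC =====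
def Spec_analyze_options (argv : List String) (keywords : List String) (out : Option String × (List (String × String))) : Prop := out = analyze_options_alt argv keywords
instance (argv : List String) (keywords : List String) (out : Option String × (List (String × String))) : Decidable (Spec_analyze_options argv keywords out) := by unfold Spec_analyze_options; infer_instance

-- ===== CLAIM (what is proved, stated in full; the proofs are below) =====
def Claim_equal_analyze_options : Prop := ∀ (argv : List String) (keywords : List String), Dom_analyze_options argv keywords → Spec_analyze_options argv keywords (analyze_options argv keywords)

-- ===== LEMMAS AND PROOFS =====

-- reference decomposition: (values before the first keyword, [(keyword, values until next keyword), …])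
def pvSplitG (kw : List String) : List String → List String × List (String × List String)
  | [] => ([], [])
  | x :: xs =>
    let r := pvSplitG kw xs
    if x ∈ kw then ([], (x, r.1) :: r.2) else (x :: r.1, r.2)

def pvMkName (pre : List String) : Option String :=
  if pre.length = 0 then none else some (PySem.Str.join " " pre)

def pvMkDict (d : PySem.Dict String String) (gs : List (String × List String)) : PySem.Dict String String :=
  gs.foldl (fun d g => d.insert g.1 (PySem.Str.join " " g.2)) d

def pvKiAux (kw : List String) (argv : List String) (s : Int) : List Int :=
  (PySem.List.enumerate argv s).filterMap (fun p => if p.2 ∈ kw then some p.1 else none)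

def pvSlicesOf (xs : List String) (ks : List Int) : List (List String) :=
  (List.zip (none :: ks.map some) (ks.map some ++ [none])).map (fun p => PySem.List.slice xs p.1 p.2)

def pvTailChain (xs : List String) (a : Int) : List Int → List (List String)
  | [] => [PySem.List.slice xs (some a) none]
  | b :: t => PySem.List.slice xs (some a) (some b) :: pvTailChain xs b t

theorem pvEnumerate_cons {α : Type} (x : α) (xs : List α) (s : Int) :
    PySem.List.enumerate (x :: xs) s = (s, x) :: PySem.List.enumerate xs (s + 1) := by
  simp [PySem.List.enumerate]

theorem pvKiAux_nil (kw : List String) (s : Int) : pvKiAux kw [] s = [] := by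
  simp [pvKiAux, PySem.List.enumerate]

theorem pvKiAux_cons (kw : List String) (x : String) (xs : List String) (s : Int) :
    pvKiAux kw (x :: xs) s =
      if x ∈ kw then s :: pvKiAux kw xs (s + 1) else pvKiAux kw xs (s + 1) := by
  simp only [pvKiAux, pvEnumerate_cons, List.filterMap_cons]
  by_cases h : x ∈ kw <;> simp [h]

theorem pvKiAux_nonneg (kw : List String) (xs : List String) (s : Int) :
    ∀ i ∈ pvKiAux kw xs s, s ≤ i := by
  induction xs generalizing s with
  | nil => simp [pvKiAux_nil]
  | cons x xs ih =>
    intro i hi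
    rw [pvKiAux_cons] at hi
    by_cases h : x ∈ kw
    · simp [h] at hi
      rcases hi with hi | hi
      · omega
      · have := ih (s + 1) i hi; omega
    · simp [h] at hi
      have := ih (s + 1) i hi; omega

theorem pvKiAux_pairwise (kw : List String) (xs : List String) (s : Int) :
    (pvKiAux kw xs s).Pairwise (fun a b => a ≤ b) := by
  induction xs generalizing s with
  | nil => simp [pvKiAux_nil]
  | cons x xs ih =>
    rw [pvKiAux_cons]
    by_cases h : x ∈ kw
    · simp only [h, if_pos]
      refine List.Pairwise.cons ?_ (ih (s + 1))
      intro b hb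
      have := pvKiAux_nonneg kw xs (s + 1) b hb; omega
    · simp only [h, if_neg, not_false_iff]
      exact ih (s + 1)

theorem pvKiAux_shift (kw : List String) (xs : List String) (s : Int) :
    pvKiAux kw xs (s + 1) = (pvKiAux kw xs s).map (· + 1) := by
  induction xs generalizing s with
  | nil => simp [pvKiAux_nil]
  | cons x xs ih =>
    rw [pvKiAux_cons, pvKiAux_cons]
    by_cases h : x ∈ kw <;> simp [h, ih]

-- slice arithmetic on a cons cell
theorem pvSlice_cons_none_some (x : String) (xs : List String) (k : Int) (hk : 0 ≤ k) :
    PySem.List.slice (x :: xs) none (some (k + 1)) = x :: PySem.List.slice xs none (some k) := by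
  rw [PySem.List.slice_to _ (by omega : (0:Int) ≤ k + 1), PySem.List.slice_to _ hk]
  have h1 : (k + 1).toNat = k.toNat + 1 := by omega
  rw [h1, List.take_succ_cons]

theorem pvSlice_cons_some_none (x : String) (xs : List String) (k : Int) (hk : 0 ≤ k) :
    PySem.List.slice (x :: xs) (some (k + 1)) none = PySem.List.slice xs (some k) none := by
  rw [PySem.List.slice_from _ (by omega : (0:Int) ≤ k + 1), PySem.List.slice_from _ hk]
  have h1 : (k + 1).toNat = k.toNat + 1 := by omega
  rw [h1, List.drop_succ_cons]

theorem pvSlice_cons_some_some (x : String) (xs : List String) (k j : Int)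
    (hk : 0 ≤ k) (hj : 0 ≤ j) :
    PySem.List.slice (x :: xs) (some (k + 1)) (some (j + 1)) = PySem.List.slice xs (some k) (some j) := by
  rw [PySem.List.slice_toNat _ (by omega : (0:Int) ≤ k + 1) (by omega : (0:Int) ≤ j + 1),
      PySem.List.slice_toNat _ hk hj]
  have h1 : (k + 1).toNat = k.toNat + 1 := by omega
  rw [h1]
  have h2 : (j + 1).toNat - (k.toNat + 1) = j.toNat - k.toNat := by omega
  rw [h2, List.drop_succ_cons]

theorem pvTailChain_shift (x : String) (xs : List String) (a : Int) (ks : List Int)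
    (ha : 0 ≤ a) (hks : ∀ k ∈ ks, 0 ≤ k) :
    pvTailChain (x :: xs) (a + 1) (ks.map (· + 1)) = pvTailChain xs a ks := by
  induction ks generalizing a with
  | nil => simp [pvTailChain, pvSlice_cons_some_none x xs a ha]
  | cons b t ih =>
    have hb : 0 ≤ b := hks b (by simp)
    simp only [List.map_cons, pvTailChain]
    rw [pvSlice_cons_some_some x xs a b ha hb,
      ih b hb (fun k hk => hks k (List.mem_cons_of_mem _ hk))]

theorem pvSlicesOf_zipTail (xs : List String) (a : Int) (ks : List Int) :
    (List.zip (some a :: ks.map some) (ks.map some ++ [(none : Option Int)])).map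
        (fun p => PySem.List.slice xs p.1 p.2) = pvTailChain xs a ks := by
  induction ks generalizing a with
  | nil => simp [pvTailChain]
  | cons b t ih => simp only [List.map_cons, List.cons_append, List.zip_cons_cons, pvTailChain, ih]

theorem pvSlicesOf_cons (xs : List String) (a : Int) (ks : List Int) :
    pvSlicesOf xs (a :: ks) = PySem.List.slice xs none (some a) :: pvTailChain xs a ks := by
  simp only [pvSlicesOf, List.map_cons, List.cons_append, List.zip_cons_cons]
  rw [pvSlicesOf_zipTail]

theorem pvTailChain_zero (xs : List String) (ks : List Int) :
    pvTailChain xs 0 ks = pvSlicesOf xs ks := by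
  cases ks with
  | nil => simp [pvTailChain, pvSlicesOf, PySem.List.slice_none_none,
      PySem.List.slice_from _ (le_refl (0:Int))]
  | cons b t =>
    rw [pvSlicesOf_cons]
    simp only [pvTailChain]
    rw [PySem.List.slice_zero_start]

theorem pvSlicesOf_shift (x : String) (xs : List String) (ks : List Int)
    (hks : ∀ k ∈ ks, 0 ≤ k) (pre : List String) (rest : List (List String))
    (h : pvSlicesOf xs ks = pre :: rest) :
    pvSlicesOf (x :: xs) (ks.map (· + 1)) = (x :: pre) :: rest := by
  cases ks with
  | nil =>
    simp only [pvSlicesOf, List.map_nil, List.zip_cons_cons, List.nil_append, List.zip_nil_left,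
      List.map_cons, PySem.List.slice_none_none] at h ⊢
    injection h with h1 h2
    simp [← h1, ← h2]
  | cons b t =>
    have hb : 0 ≤ b := hks b (by simp)
    rw [pvSlicesOf_cons] at h
    injection h with h1 h2
    simp only [List.map_cons]
    rw [pvSlicesOf_cons, pvSlice_cons_none_some x xs b hb,
      pvTailChain_shift x xs b t hb (fun k hk => hks k (by simp [hk])), h1, h2]

theorem pvSlices_splitG (kw : List String) (argv : List String) :
    pvSlicesOf argv (pvKiAux kw argv 0) =
      (pvSplitG kw argv).1 :: (pvSplitG kw argv).2.map (fun g => g.1 :: g.2) := by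
  induction argv with
  | nil => simp [pvKiAux_nil, pvSlicesOf, pvSplitG, PySem.List.slice_none_none]
  | cons x xs ih =>
    have hnn : ∀ k ∈ pvKiAux kw xs 0, 0 ≤ k := pvKiAux_nonneg kw xs 0
    rw [pvKiAux_cons]
    have hshift : pvKiAux kw xs (0 + 1) = (pvKiAux kw xs 0).map (· + 1) := pvKiAux_shift kw xs 0
    by_cases h : x ∈ kw
    · simp only [h, if_pos]
      rw [hshift, pvSlicesOf_cons]
      have hz : PySem.List.slice (x :: xs) none (some 0) = [] := by
        rw [PySem.List.slice_to _ (le_refl (0:Int))]; simp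
      rw [hz, pvTailChain_zero,
        pvSlicesOf_shift x xs (pvKiAux kw xs 0) hnn _ _ ih]
      simp [pvSplitG, h]
    · simp only [h, if_neg, not_false_iff]
      rw [hshift, pvSlicesOf_shift x xs (pvKiAux kw xs 0) hnn _ _ ih]
      simp [pvSplitG, h]

-- characterization of port A
theorem pvA_char (argv kw : List String) :
    analyze_options argv kw =
      (pvMkName (pvSplitG kw argv).1, (pvMkDict PySem.Dict.empty (pvSplitG kw argv).2).items) := by
  unfold analyze_options
  dsimp only
  have hsorted :
      PySem.List.sorted
        ((PySem.List.enumerate argv).filterMap (fun p => if p.2 ∈ kw then some p.1 else none))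
        (fun i => i) = pvKiAux kw argv 0 :=
    PySem.List.sorted_eq_self_of_pairwise _ _ (pvKiAux_pairwise kw argv 0)
  rw [hsorted]
  have hsl :
      (List.zip ((none : Option Int) :: (pvKiAux kw argv 0).map some)
          ((pvKiAux kw argv 0).map some ++ [none])).map
        (fun p => PySem.List.slice argv p.1 p.2) =
      (pvSplitG kw argv).1 :: (pvSplitG kw argv).2.map (fun g => g.1 :: g.2) :=
    pvSlices_splitG kw argv
  rw [hsl]
  simp only [pvMkName, pvMkDict, List.foldl_map]

-- fold invariant of port B: running the loop from any state and flushing once afterwards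
theorem pvB_fold (kw : List String) (argv : List String) :
    ∀ (name : Option String) (options : PySem.Dict String String)
      (ck : Option String) (cv : List String),
    (let st := argv.foldl (pvStepB kw) (name, options, ck, cv)
     pvFlush st.1 st.2.1 st.2.2.1 st.2.2.2) =
    (let p := pvFlush name options ck (cv ++ (pvSplitG kw argv).1)
     (p.1, pvMkDict p.2 (pvSplitG kw argv).2)) := by
  induction argv with
  | nil =>
    intro name options ck cv
    simp only [List.foldl_nil, pvSplitG, List.append_nil, pvMkDict, List.foldl_nil]
  | cons x xs ih =>
    intro name options ck cv
    simp only [List.foldl_cons]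
    by_cases h : x ∈ kw
    · simp only [pvStepB, h, if_pos]
      rw [ih]
      simp only [pvSplitG, h, if_pos, List.append_nil, List.nil_append]
      cases ck with
      | none => simp [pvFlush, pvMkDict]
      | some k => simp [pvFlush, pvMkDict]
    · simp only [pvStepB, h, if_neg, not_false_iff]
      rw [ih]
      simp only [pvSplitG, h, if_neg, not_false_iff, List.append_assoc, List.cons_append,
        List.nil_append]

-- characterization of port B
theorem pvB_char (argv kw : List String) :
    analyze_options_alt argv kw =
      (pvMkName (pvSplitG kw argv).1, (pvMkDict PySem.Dict.empty (pvSplitG kw argv).2).items) := by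
  unfold analyze_options_alt
  dsimp only
  have h := pvB_fold kw argv none PySem.Dict.empty none []
  simp only at h
  rw [h]
  simp only [List.nil_append, pvFlush, pvMkName]
  rcases hp : (pvSplitG kw argv).1 with _ | ⟨y, ys⟩ <;> simp

-- ===== VERDICT (by name: the statement is the Claim_ definition above) =====
theorem analyze_options_spec : Claim_equal_analyze_options := by
  intro argv keywords _
  unfold Spec_analyze_options
  rw [pvA_char, pvB_char]
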